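-- pv_equiv track=rewrite | github.com/ds5105119/algorithm | 11386_2.py | count_periodic_strings
-- ===== SOURCE A (Python) =====
-- MOD = 10 ** 9 + 7
--
-- def count_periodic_strings(L, periodic_counts):
--     if periodic_counts[L] != -1:
--         return periodic_counts[L]
--     if L == 1:
--         periodic_counts[L] = 0  # Single character strings are not periodic
--         return 0
--     count = 0
--     for i in range(1, L):
--         if L % i == 0:
--             count += pow(2, i, MOD)
--             count %= MOD
--     periodic_counts[L] = count
--     return count
-- ===== SOURCE B (Python) =====
-- MOD = 10 ** 9 + 7
--
-- def count_periodic_strings(L, periodic_counts):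
--     # Divisor-pair enumeration: each divisor d <= sqrt(L) contributes itself and
--     # its cofactor L // d, so only O(sqrt(L)) iterations are needed.
--     memo = periodic_counts[L]
--     if memo != -1:
--         return memo
--     if L < 2:
--         periodic_counts[L] = 0
--         return 0
--     count = 0
--     d = 1
--     while d * d <= L:
--         if L % d == 0:
--             count += pow(2, d, MOD)
--             e = L // d
--             if e != d and e != L:
--                 count += pow(2, e, MOD)
--         d += 1
--     count %= MOD
--     periodic_counts[L] = count
--     return count
-- ===== Notes on version B (the rewrite author's own statement) =====
-- stated objective: alternative
-- what changed: Replaces the scan of all i in 1..L-1 by divisor-pair enumeration: only d with d*d <= L are tried, each divisor d also yielding its cofactor L//d (excluding L itself), with one final reduction mod 1e9+7 instead of one per divisor.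
import Mathlib
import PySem

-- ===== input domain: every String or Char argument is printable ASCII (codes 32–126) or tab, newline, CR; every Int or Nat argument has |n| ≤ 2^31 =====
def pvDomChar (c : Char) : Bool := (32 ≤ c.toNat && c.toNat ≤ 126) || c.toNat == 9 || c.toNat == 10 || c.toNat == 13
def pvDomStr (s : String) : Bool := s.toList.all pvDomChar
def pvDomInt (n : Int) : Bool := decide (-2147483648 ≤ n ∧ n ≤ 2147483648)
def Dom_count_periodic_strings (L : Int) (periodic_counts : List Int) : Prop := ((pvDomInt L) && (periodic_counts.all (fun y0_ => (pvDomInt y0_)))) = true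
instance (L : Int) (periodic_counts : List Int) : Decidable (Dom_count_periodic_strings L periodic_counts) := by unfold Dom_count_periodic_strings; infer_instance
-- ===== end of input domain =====

-- B replaces A's scan over all of 1..L-1 by divisor-pair enumeration up to sqrt(L) (fewer divisibility tests; speed not measured here).
-- Both A and B write the computed value back into periodic_counts[L] in the same way; the
-- equivalence proved here is about the RETURN value only.

-- ===== PORT A =====
def pvMOD : Int := 10 ^ 9 + 7

def count_periodic_strings (L : Int) (periodic_counts : List Int) : Int :=
  match PySem.List.pyGet? periodic_counts L with
  | none => 0  -- IndexError in Python; excluded by Pre_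
  | some memo =>
    if memo ≠ -1 then memo
    else if L = 1 then 0
    else
      (PySem.List.pyRange 1 L 1).foldl
        (fun count i =>
          if PySem.Int.mod L i = 0 then
            PySem.Int.mod (count + PySem.Int.powMod 2 i.toNat pvMOD) pvMOD
          else count) 0

-- ===== PORT B =====
-- the `while d * d <= L` loop of Source B
def pvLoopB (L : Int) (d : Int) (count : Int) : Int :=
  if h : d * d ≤ L then
    let count' :=
      if PySem.Int.mod L d = 0 then
        let c1 := count + PySem.Int.powMod 2 d.toNat pvMOD
        let e := PySem.Int.floordiv L d
        if e ≠ d ∧ e ≠ L then c1 + PySem.Int.powMod 2 e.toNat pvMOD else c1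
      else count
    pvLoopB L (d + 1) count'
  else count
termination_by (L + 1 - d).toNat
decreasing_by
  have hdL : d ≤ L := by nlinarith [sq_nonneg d, sq_nonneg (d - 1)]
  omega

def count_periodic_strings_alt (L : Int) (periodic_counts : List Int) : Int :=
  match PySem.List.pyGet? periodic_counts L with
  | none => 0  -- IndexError in Python; excluded by Pre_
  | some memo =>
    if memo ≠ -1 then memo
    else if L < 2 then 0
    else PySem.Int.mod (pvLoopB L 1 0) pvMOD

-- ===== PRECONDITION & SPEC =====
-- Pre_ excludes exactly the inputs on which Python's periodic_counts[L] raises IndexError.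
def Pre_count_periodic_strings (L : Int) (periodic_counts : List Int) : Prop :=
  PySem.Raise.InRange periodic_counts.length L
instance (L : Int) (periodic_counts : List Int) : Decidable (Pre_count_periodic_strings L periodic_counts) := by
  unfold Pre_count_periodic_strings; infer_instance

def pvWitness_count_periodic_strings : Int × List Int := (6, [-1, -1, -1, -1, -1, -1, -1])

def Spec_count_periodic_strings (L : Int) (periodic_counts : List Int) (out : Int) : Prop :=
  out = count_periodic_strings_alt L periodic_counts
instance (L : Int) (periodic_counts : List Int) (out : Int) : Decidable (Spec_count_periodic_strings L periodic_counts out) := by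
  unfold Spec_count_periodic_strings; infer_instance

-- ===== CLAIM (what is proved, stated in full; the proofs are below) =====
def Claim_equal_count_periodic_strings : Prop := ∀ (L : Int) (periodic_counts : List Int), Dom_count_periodic_strings L periodic_counts → Pre_count_periodic_strings L periodic_counts → Spec_count_periodic_strings L periodic_counts (count_periodic_strings L periodic_counts)

-- ===== LEMMAS AND PROOFS =====

-- the summand 2^i mod M, indexed over Nat
def pvG (i : Nat) : Int := (2 ^ i : Int) % pvMOD

-- Nat-level contribution of one iteration of B's loop
def pvH (n d : Nat) : Int :=
  if n % d = 0 then pvG d + (if n / d ≠ d ∧ n / d ≠ n then pvG (n / d) else 0) else 0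

theorem pvMOD_pos : (0 : Int) < pvMOD := by decide

theorem pvFoldA_eq (L : Int) (l : List Int) :
    ∀ c : Int, 0 ≤ c → c < pvMOD →
      l.foldl (fun count i =>
          if PySem.Int.mod L i = 0 then
            PySem.Int.mod (count + PySem.Int.powMod 2 i.toNat pvMOD) pvMOD
          else count) c
        = (c + (l.map (fun i =>
            if PySem.Int.mod L i = 0 then PySem.Int.powMod 2 i.toNat pvMOD else 0)).sum) % pvMOD := by
  induction l with
  | nil => intro c h0 h1; simp [Int.emod_eq_of_lt h0 h1]
  | cons i l ih =>
    intro c h0 h1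
    simp only [List.foldl_cons, List.map_cons, List.sum_cons]
    by_cases hd : PySem.Int.mod L i = 0
    · simp only [hd, if_true]
      rw [PySem.Int.mod_eq_emod_of_pos pvMOD_pos]
      rw [ih _ (Int.emod_nonneg _ (by decide)) (Int.emod_lt_of_pos _ pvMOD_pos)]
      rw [Int.emod_add_emod, add_assoc]
    · simp only [hd, if_false]
      rw [ih _ h0 h1]; ring_nf

theorem pvLoopB_eq (n : Nat) :
    ∀ (k : Nat) (d c : Int), 1 ≤ d → ((Nat.sqrt n : Int) + 1 - d).toNat = k →
      pvLoopB (n : Int) d c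
        = c + ((PySem.List.pyRange d ((Nat.sqrt n : Int) + 1) 1).map
            (fun i => pvH n i.toNat)).sum := by
  intro k
  induction k with
  | zero =>
    intro d c hd hk
    have hds : (Nat.sqrt n : Int) + 1 ≤ d := by omega
    rw [pvLoopB, PySem.List.pyRange_one_eq_nil hds]
    have hdd : ¬ (d * d ≤ (n : Int)) := by
      intro hle
      obtain ⟨dn, rfl⟩ : ∃ dn : Nat, d = (dn : Int) := ⟨d.toNat, (Int.toNat_of_nonneg (by omega)).symm⟩
      have : dn * dn ≤ n := by exact_mod_cast hle
      have : dn ≤ Nat.sqrt n := Nat.le_sqrt.mpr this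
      omega
    simp [hdd]
  | succ k ih =>
    intro d c hd hk
    obtain ⟨dn, rfl⟩ : ∃ dn : Nat, d = (dn : Int) := ⟨d.toNat, (Int.toNat_of_nonneg (by omega)).symm⟩
    rw [pvLoopB]
    by_cases hdd : ((dn : Int) * dn ≤ (n : Int))
    · have hdle : dn ≤ Nat.sqrt n := Nat.le_sqrt.mpr (by exact_mod_cast hdd)
      have hcons : PySem.List.pyRange (dn : Int) ((Nat.sqrt n : Int) + 1) 1
          = (dn : Int) :: PySem.List.pyRange ((dn : Int) + 1) ((Nat.sqrt n : Int) + 1) 1 :=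
        PySem.List.pyRange_one_cons (by exact_mod_cast Nat.lt_succ_of_le hdle)
      rw [dif_pos hdd, ih (dn + 1) _ (by omega) (by omega), hcons]
      simp only [List.map_cons, List.sum_cons, Int.toNat_natCast]
      have hmod : PySem.Int.mod (n : Int) (dn : Int) = ((n % dn : Nat) : Int) :=
        PySem.Int.mod_natCast n dn
      have hdiv : PySem.Int.floordiv (n : Int) (dn : Int) = ((n / dn : Nat) : Int) :=
        PySem.Int.floordiv_natCast n dn
      have hpow : ∀ m : Nat, PySem.Int.powMod 2 m pvMOD = pvG m := by
        intro m; exact PySem.Int.powMod_eq_emod 2 m pvMOD_pos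
      unfold pvH
      by_cases h0 : n % dn = 0
      · simp only [hmod, hdiv, h0, Nat.cast_zero, if_true, Int.toNat_natCast, hpow]
        by_cases hc : ((n / dn : Nat) : Int) ≠ (dn : Int) ∧ ((n / dn : Nat) : Int) ≠ (n : Int)
        · have hc' : n / dn ≠ dn ∧ n / dn ≠ n := by
            constructor <;> [exact fun h => hc.1 (by exact_mod_cast h); exact fun h => hc.2 (by exact_mod_cast h)]
          rw [if_pos hc, if_pos hc']
          ring
        · have hc' : ¬ (n / dn ≠ dn ∧ n / dn ≠ n) := by
            intro h; exact hc ⟨by exact_mod_cast h.1, by exact_mod_cast h.2⟩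
          rw [if_neg hc, if_neg hc']
          ring
      · have h0' : ¬ ((n % dn : Nat) : Int) = 0 := by exact_mod_cast h0
        simp only [hmod, if_neg h0', h0, if_false]
        ring
    · exfalso
      have : dn ≤ Nat.sqrt n := by omega
      exact hdd (by exact_mod_cast Nat.le_sqrt.mp this)

-- generic: sum of (if P then f else 0) over l = sum of f over l.filter P
theorem pvSumIte {α : Type} (l : List α) (P : α → Prop) [DecidablePred P] (f : α → Int) :
    (l.map (fun x => if P x then f x else 0)).sum = ((l.filter (fun x => decide (P x))).map f).sum := by
  induction l with
  | nil => simp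
  | cons a l ih =>
    by_cases h : P a <;> simp [h, ih]

theorem pvSumAdd {α : Type} (l : List α) (f g : α → Int) :
    (l.map (fun x => f x + g x)).sum = (l.map f).sum + (l.map g).sum := by
  induction l with
  | nil => simp
  | cons a l ih => simp [ih]; ring

theorem pvCore (n : Nat) (hn : 2 ≤ n) :
    ((((List.range' 1 (n - 1)).filter (fun i => n % i = 0)).map pvG).sum)
      = ((List.range' 1 (Nat.sqrt n)).map (fun d => pvH n d)).sum := by
  have hn0 : n ≠ 0 := by omega
  -- small divisors (≤ sqrt n) and their large cofactors
  set small : List Nat := (List.range' 1 (Nat.sqrt n)).filter (fun d => n % d = 0) with hsmall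
  set C : Nat → Prop := fun d => n / d ≠ d ∧ n / d ≠ n with hC
  set big : List Nat := (small.filter (fun d => decide (C d))).map (fun d => n / d) with hbig
  -- facts about members of small
  have hsmall_mem : ∀ d ∈ small, 1 ≤ d ∧ d ≤ Nat.sqrt n ∧ n % d = 0 := by
    intro d hd
    rw [hsmall, List.mem_filter] at hd
    obtain ⟨h1, h2⟩ := hd
    rw [List.mem_range'_1] at h1
    exact ⟨h1.1, by omega, by simpa using h2⟩
  -- RHS reshaping
  have hrhs : ((List.range' 1 (Nat.sqrt n)).map (fun d => pvH n d)).sum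
      = (small.map pvG).sum + (big.map pvG).sum := by
    unfold pvH
    rw [pvSumIte _ (fun d => n % d = 0) (fun d => pvG d + (if n / d ≠ d ∧ n / d ≠ n then pvG (n / d) else 0))]
    rw [← hsmall, pvSumAdd]
    congr 1
    rw [pvSumIte small C (fun d => pvG (n / d)), hbig, List.map_map]
    rfl
  rw [hrhs]
  rw [← List.sum_append, ← List.map_append]
  -- the two divisor lists are permutations of each other
  have hperm : ((List.range' 1 (n - 1)).filter (fun i => n % i = 0)).Perm (small ++ big) := by
    rw [List.perm_ext_iff_of_nodup]
    · intro i
      rw [List.mem_filter, List.mem_range'_1, List.mem_append]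
      constructor
      · rintro ⟨⟨h1, h2⟩, h3⟩
        have h3' : n % i = 0 := by simpa using h3
        have hdvd : i ∣ n := Nat.dvd_of_mod_eq_zero h3'
        by_cases hs : i ≤ Nat.sqrt n
        · left
          rw [hsmall, List.mem_filter, List.mem_range'_1]
          exact ⟨⟨h1, by omega⟩, by simpa using h3'⟩
        · right
          push Not at hs
          have hii : n < i * i := by
            have := Nat.sqrt_lt'.mp hs; nlinarith [this]
          set d := n / i with hd
          have hdi : d * i = n := Nat.div_mul_cancel hdvd
          have hdlt : d < i := by nlinarith
          have hd1 : 1 ≤ d := by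
            rw [hd]; exact (Nat.one_le_div_iff (by omega)).mpr (by omega)
          have hdds : d ≤ Nat.sqrt n := Nat.le_sqrt.mpr (by nlinarith)
          have hddvd : d ∣ n := ⟨i, hdi.symm⟩
          have hnd : n / d = i := by
            rw [← hdi, Nat.mul_div_cancel_left _ (by omega)]
          rw [hbig, List.mem_map]
          refine ⟨d, ?_, hnd⟩
          rw [List.mem_filter, hsmall, List.mem_filter, List.mem_range'_1]
          refine ⟨⟨⟨hd1, by omega⟩, by simp [Nat.mod_eq_zero_of_dvd hddvd]⟩, ?_⟩
          simp only [hC, decide_eq_true_eq]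
          exact ⟨by omega, by omega⟩
      · rintro (h | h)
        · obtain ⟨h1, h2, h3⟩ := hsmall_mem i h
          have : Nat.sqrt n < n := Nat.sqrt_lt_self (by omega)
          exact ⟨⟨h1, by omega⟩, by simpa using h3⟩
        · rw [hbig, List.mem_map] at h
          obtain ⟨d, hdmem, rfl⟩ := h
          rw [List.mem_filter] at hdmem
          obtain ⟨hdmem, hcd⟩ := hdmem
          obtain ⟨h1, h2, h3⟩ := hsmall_mem d hdmem
          simp only [hC, decide_eq_true_eq] at hcd
          have hdvd : d ∣ n := Nat.dvd_of_mod_eq_zero h3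
          have hidvd : n / d ∣ n := Nat.div_dvd_of_dvd hdvd
          have hile : n / d ≤ n := Nat.le_of_dvd (by omega) hidvd
          have hige : 1 ≤ n / d := (Nat.one_le_div_iff (by omega)).mpr
            (le_trans h2 (le_of_lt (Nat.sqrt_lt_self (by omega))))
          refine ⟨⟨hige, ?_⟩, by simp [Nat.mod_eq_zero_of_dvd hidvd]⟩
          have : n / d ≠ n := hcd.2
          omega
    · exact List.Nodup.filter _ (List.nodup_range' 1)
    · rw [List.nodup_append]
      refine ⟨List.Nodup.filter _ (List.nodup_range' 1), ?_, ?_⟩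
      · rw [hbig]
        refine List.Nodup.map_on ?_ (List.Nodup.filter _ (List.Nodup.filter _ (List.nodup_range' 1)))
        intro x hx y hy hxy
        rw [List.mem_filter] at hx hy
        obtain ⟨hx1, hx2, hx3⟩ := hsmall_mem x hx.1
        obtain ⟨hy1, hy2, hy3⟩ := hsmall_mem y hy.1
        have hx4 := Nat.div_div_self (Nat.dvd_of_mod_eq_zero hx3) hn0
        have hy4 := Nat.div_div_self (Nat.dvd_of_mod_eq_zero hy3) hn0
        rw [hxy] at hx4
        omega
      · intro a ha b hb
        rw [hbig, List.mem_map] at hb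
        obtain ⟨d, hdmem, rfl⟩ := hb
        rw [List.mem_filter] at hdmem
        obtain ⟨hdmem, hcd⟩ := hdmem
        simp only [hC, decide_eq_true_eq] at hcd
        obtain ⟨hd1, hd2, hd3⟩ := hsmall_mem d hdmem
        obtain ⟨ha1, ha2, ha3⟩ := hsmall_mem a ha
        intro heq
        -- a ≤ sqrt n and a = n / d with d ≤ sqrt n forces a = d, contradicting n/d ≠ d
        have hdvd : d ∣ n := Nat.dvd_of_mod_eq_zero hd3
        have hda : a * d = n := by rw [heq]; exact Nat.div_mul_cancel hdvd
        have haa : a * a ≤ n := Nat.le_sqrt.mp ha2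
        have hdd : d * d ≤ n := Nat.le_sqrt.mp hd2
        have had : a = d := by nlinarith
        exact hcd.1 (by omega)
  exact (hperm.map pvG).sum_eq


-- bridge: a pyRange 1 (s+1) sum of Int-valued terms is a range' 1 s sum of Nat-indexed terms
theorem pvBridge (s : Nat) (b : Int) (hb : b = (s : Int) + 1) (f : Int → Int) (g : Nat → Int)
    (h : ∀ k : Nat, 1 ≤ k → k ≤ s → f (k : Int) = g k) :
    ((PySem.List.pyRange 1 b 1).map f).sum = ((List.range' 1 s).map g).sum := by
  subst hb
  rw [PySem.List.pyRange_one, List.map_map, List.range'_eq_map_range, List.map_map]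
  congr 1
  have hs : ((s : Int) + 1 - 1).toNat = s := by omega
  rw [hs]
  apply List.map_congr_left
  intro k hk
  rw [List.mem_range] at hk
  simp only [Function.comp_apply]
  have : (1 : Int) + (k : Int) = ((1 + k : Nat) : Int) := by push_cast; ring
  rw [this, h (1 + k) (by omega) (by omega)]

-- ===== VERDICT (by name: the statement is the Claim_ definition above) =====
theorem count_periodic_strings_spec : Claim_equal_count_periodic_strings := by
  unfold Claim_equal_count_periodic_strings
  intro L pc _ _
  unfold Spec_count_periodic_strings count_periodic_strings count_periodic_strings_alt
  cases hm : PySem.List.pyGet? pc L with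
  | none => rfl
  | some memo =>
    by_cases hmemo : memo ≠ -1
    · simp [hmemo]
    · simp only [hmemo, if_false]
      by_cases hL1 : L = 1
      · rw [if_pos hL1, if_pos (by omega)]
      · rw [if_neg hL1]
        by_cases hL2 : L < 2
        · rw [if_pos hL2, PySem.List.pyRange_one_eq_nil (by omega), List.foldl_nil]
        · rw [if_neg hL2]
          push Not at hL2
          obtain ⟨n, rfl⟩ : ∃ n : Nat, L = (n : Int) := ⟨L.toNat, (Int.toNat_of_nonneg (by omega)).symm⟩
          have hn : 2 ≤ n := by exact_mod_cast hL2
          -- A side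
          rw [pvFoldA_eq (n : Int) _ 0 le_rfl pvMOD_pos, zero_add]
          rw [pvBridge (n - 1) (n : Int) (by push_cast [show 1 ≤ n by omega]; ring)
              (fun i => if PySem.Int.mod (n : Int) i = 0 then PySem.Int.powMod 2 i.toNat pvMOD else 0)
              (fun i => if n % i = 0 then pvG i else 0)
              (by
                intro k hk1 hk2
                simp only [PySem.Int.mod_natCast, Nat.cast_eq_zero, Int.toNat_natCast]
                by_cases h0 : n % k = 0
                · rw [if_pos h0, if_pos h0, PySem.Int.powMod_eq_emod 2 k pvMOD_pos]; rfl
                · rw [if_neg h0, if_neg h0])]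
          -- B side
          rw [PySem.Int.mod_eq_emod_of_pos pvMOD_pos,
              pvLoopB_eq n ((Nat.sqrt n : Int) + 1 - 1).toNat 1 0 le_rfl rfl, zero_add]
          rw [pvBridge (Nat.sqrt n) ((Nat.sqrt n : Int) + 1) rfl (fun i => pvH n i.toNat) (pvH n)
              (by intro k _ _; simp)]
          -- the core identity
          rw [pvSumIte (List.range' 1 (n - 1)) (fun i => n % i = 0) pvG, ← pvCore n hn]
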